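-- pv_equiv track=rewrite | github.com/WeymannC/aoc2025 | 12.py | augment_shape
-- ===== SOURCE A (Python) =====
-- def augment_shape(base_shape):
--     def rotate(shape):
--         return tuple("".join(line[i] for line in shape[::-1]) for i in range(len(shape[0])))
--     def rotated(shape):
--         return {shape, rotate(shape), rotate(rotate(shape)), rotate(rotate(rotate(shape)))}
--     def flip(shape):
--         return tuple(line[::-1] for line in shape)
--     return rotated(base_shape) | rotated(flip(base_shape))
-- ===== SOURCE B (Python) =====
-- def augment_shape(base_shape):
--     h, w = len(base_shape), len(base_shape[0])
--     # each rotation is computed straight from g in one pass by its own closed-form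
--     # index formula -- never by composing a single 90-degree map as A does
--     def quarter(g):
--         return tuple("".join(g[h - 1 - j][i] for j in range(h)) for i in range(w))
--     def half(g):
--         return tuple("".join(g[h - 1 - i][w - 1 - j] for j in range(w)) for i in range(h))
--     def threequarter(g):
--         return tuple("".join(g[j][w - 1 - i] for j in range(h)) for i in range(w))
--     mirror = tuple(line[::-1] for line in base_shape)
--     return {img for g in (base_shape, mirror)
--             for img in (g, quarter(g), half(g), threequarter(g))}
-- ===== Notes on version B (the rewrite author's own statement) =====
-- stated objective: alternative
-- what changed: B has no iterated rotation: each of the 90/180/270-degree rotations is produced in a single pass straight from the grid by its own closed-form index formula (applied to the shape and to its mirror), instead of A's composing one 90-degree rotate helper up to three times and materializing the intermediate grids.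
import Mathlib
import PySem

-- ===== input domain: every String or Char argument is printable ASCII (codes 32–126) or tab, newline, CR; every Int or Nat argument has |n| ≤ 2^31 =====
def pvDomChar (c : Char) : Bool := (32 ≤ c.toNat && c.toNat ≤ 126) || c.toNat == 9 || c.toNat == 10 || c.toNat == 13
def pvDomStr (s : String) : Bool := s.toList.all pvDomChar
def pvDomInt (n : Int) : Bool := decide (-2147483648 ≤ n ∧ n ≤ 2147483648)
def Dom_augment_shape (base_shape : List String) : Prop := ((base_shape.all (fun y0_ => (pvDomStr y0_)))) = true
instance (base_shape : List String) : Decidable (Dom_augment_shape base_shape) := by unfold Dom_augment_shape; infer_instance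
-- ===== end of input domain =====

-- B computes each of the three rotations straight from the grid by its own closed-form index
-- formula (one pass each, no intermediate grids), instead of A's composing one 90° rotate
-- helper up to three times; objective: alternative.

-- ===== PORT A =====
-- rotate(shape): tuple("".join(line[i] for line in shape[::-1]) for i in range(len(shape[0])))
-- grids are carried as List (List Char); line[i] is total here via getD, exact under Pre_
-- (Pre_ guarantees i < len(shape[0]) ≤ len(line); Python raises exactly on the excluded inputs)
def pvRotA (g : List (List Char)) : List (List Char) :=
  (List.range (g.headD []).length).map (fun i => g.reverse.map (fun line => line.getD i ' '))

-- flip(shape): tuple(line[::-1] for line in shape)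
def pvFlip (g : List (List Char)) : List (List Char) := g.map List.reverse

def augment_shape (base_shape : List String) : List (List String) :=
  let s := base_shape.map String.toList
  let f := pvFlip s
  let r1 := PySem.Set.ofList [s, pvRotA s, pvRotA (pvRotA s), pvRotA (pvRotA (pvRotA s))]
  let r2 := PySem.Set.ofList [f, pvRotA f, pvRotA (pvRotA f), pvRotA (pvRotA (pvRotA f))]
  (PySem.Set.union r1 r2).map (fun t => t.map String.ofList)

-- ===== PORT B =====
-- quarter(g): tuple("".join(g[h-1-j][i] for j in range(h)) for i in range(w))
-- g[r][c] is total here via getD, exact under Pre_ (Python raises exactly on the excluded inputs)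
def pvQuarter (g : List (List Char)) (h w : Nat) : List (List Char) :=
  (List.range w).map (fun i => (List.range h).map (fun j => (g.getD (h - 1 - j) []).getD i ' '))

-- half(g): tuple("".join(g[h-1-i][w-1-j] for j in range(w)) for i in range(h))
def pvHalf (g : List (List Char)) (h w : Nat) : List (List Char) :=
  (List.range h).map (fun i => (List.range w).map (fun j => (g.getD (h - 1 - i) []).getD (w - 1 - j) ' '))

-- threequarter(g): tuple("".join(g[j][w-1-i] for j in range(h)) for i in range(w))
def pvThreeQuarter (g : List (List Char)) (h w : Nat) : List (List Char) :=
  (List.range w).map (fun i => (List.range h).map (fun j => (g.getD j []).getD (w - 1 - i) ' '))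

def augment_shape_alt (base_shape : List String) : List (List String) :=
  let b := base_shape.map String.toList
  let h := b.length
  let w := (b.headD []).length
  let m := b.map List.reverse
  (PySem.Set.ofList
      [b, pvQuarter b h w, pvHalf b h w, pvThreeQuarter b h w,
       m, pvQuarter m h w, pvHalf m h w, pvThreeQuarter m h w]).map
    (fun t => t.map String.ofList)

-- ===== PRECONDITION & SPEC =====
-- Pre_ is exactly where Python A returns: a nonempty shape whose first line is nonempty and no
-- line is shorter than the first (otherwise A's shape[0] or rotate's line[i] raises IndexError).
def Pre_augment_shape (base_shape : List String) : Prop :=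
  base_shape ≠ [] ∧ 0 < (base_shape.headD "").toList.length ∧
    ∀ s ∈ base_shape, (base_shape.headD "").toList.length ≤ s.toList.length
instance (base_shape : List String) : Decidable (Pre_augment_shape base_shape) := by
  unfold Pre_augment_shape; infer_instance

def pvWitness_augment_shape : List String := ["ab", "cd"]

def Spec_augment_shape (base_shape : List String) (out : List (List String)) : Prop := out = augment_shape_alt base_shape
instance (base_shape : List String) (out : List (List String)) : Decidable (Spec_augment_shape base_shape out) := by unfold Spec_augment_shape; infer_instance

-- ===== CLAIM (what is proved, stated in full; the proofs are below) =====
def Claim_equal_augment_shape : Prop := ∀ (base_shape : List String), Dom_augment_shape base_shape → Pre_augment_shape base_shape → Spec_augment_shape base_shape (augment_shape base_shape)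

-- ===== LEMMAS AND PROOFS =====

-- the canonical index-built R×C grid of a cell function
def pvGrid (f : Nat → Nat → Char) (R C : Nat) : List (List Char) :=
  (List.range R).map (fun r => (List.range C).map (fun c => f r c))

lemma pvGrid_congr {f g : Nat → Nat → Char} {R C : Nat}
    (h : ∀ r < R, ∀ c < C, f r c = g r c) : pvGrid f R C = pvGrid g R C := by
  unfold pvGrid
  refine List.map_congr_left fun r hr => List.map_congr_left fun c hc => ?_
  exact h r (List.mem_range.mp hr) c (List.mem_range.mp hc)

-- reversal as an index map
lemma pv_reverse_eq_map (g : List (List Char)) :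
    g.reverse = (List.range g.length).map (fun j => g.getD (g.length - 1 - j) []) := by
  refine List.ext_getElem (by simp) fun j h1 h2 => ?_
  have hj : j < g.length := by simpa using h1
  rw [List.getElem_reverse, List.getElem_map, List.getElem_range,
      List.getD_eq_getElem g [] (by omega)]

-- A's rotate IS B's closed-form quarter turn (no shape hypotheses: both totalised with ' ')
lemma pvRotA_eq_quarter (g : List (List Char)) :
    pvRotA g = pvQuarter g g.length (g.headD []).length := by
  unfold pvRotA pvQuarter
  refine List.map_congr_left fun i _ => ?_
  rw [pv_reverse_eq_map, List.map_map]
  rfl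

-- A's rotate on an index-built grid is the index-built rotated grid
lemma pvRotA_grid (f : Nat → Nat → Char) (R C : Nat) (hR : 0 < R) :
    pvRotA (pvGrid f R C) = pvGrid (fun i j => f (R - 1 - j) i) C R := by
  have hhead : (pvGrid f R C).headD [] = (List.range C).map (fun c => f 0 c) := by
    obtain ⟨R', rfl⟩ := Nat.exists_eq_succ_of_ne_zero hR.ne'
    simp [pvGrid, List.range_succ_eq_map]
  unfold pvRotA
  rw [hhead, List.length_map, List.length_range]
  unfold pvGrid
  refine List.map_congr_left fun i hi => ?_
  rw [← List.map_reverse, List.map_map]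
  have hrev : (List.range R).reverse = (List.range R).map (fun r => R - 1 - r) := by
    refine List.ext_getElem (by simp) fun r h1 h2 => ?_
    simp [List.getElem_reverse]
  rw [hrev, List.map_map]
  refine List.map_congr_left fun r hr => ?_
  have hiC : i < ((List.range C).map (fun c => f (R - 1 - r) c)).length := by
    simpa using List.mem_range.mp hi
  simp only [Function.comp]
  rw [List.getD_eq_getElem _ ' ' hiC, List.getElem_map, List.getElem_range]

-- the three iterated rotations of A collapse to B's three closed-form turns
lemma pv_chain (g : List (List Char)) (h w : Nat) (hg : g.length = h)
    (hgh : (g.headD []).length = w) (hh : 0 < h) (hw : 0 < w) :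
    pvRotA g = pvQuarter g h w ∧
      pvRotA (pvRotA g) = pvHalf g h w ∧
      pvRotA (pvRotA (pvRotA g)) = pvThreeQuarter g h w := by
  subst hg hgh
  set h := g.length
  set w := (g.headD []).length
  have e1 : pvRotA g = pvQuarter g h w := pvRotA_eq_quarter g
  have hq : pvQuarter g h w =
      pvGrid (fun i j => (g.getD (h - 1 - j) []).getD i ' ') w h := rfl
  have e2 : pvRotA (pvRotA g) = pvHalf g h w := by
    rw [e1, hq, pvRotA_grid _ w h hw]
    rfl
  have e3 : pvRotA (pvRotA (pvRotA g)) = pvThreeQuarter g h w := by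
    rw [e2, show pvHalf g h w =
      pvGrid (fun i j => (g.getD (h - 1 - i) []).getD (w - 1 - j) ' ') h w from rfl,
      pvRotA_grid _ h w hh]
    exact pvGrid_congr fun r hr c hc => by
      congr 2
      omega
  exact ⟨e1, e2, e3⟩

-- folding Set.update over a deduplicated list adds the same elements in the same order
lemma pv_update_ofList {α : Type} [BEq α] [LawfulBEq α] (s : PySem.Set α) (xs : List α) :
    PySem.Set.update s (PySem.Set.ofList xs) = PySem.Set.update s xs := by
  induction xs using List.reverseRecOn generalizing s with
  | nil => rfl
  | append_singleton ys x ih =>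
    rw [PySem.Set.ofList_append_singleton, PySem.Set.update_append]
    by_cases hx : x ∈ PySem.Set.ofList ys
    · rw [PySem.Set.add_of_mem hx, ih]
      have hx' : x ∈ PySem.Set.update s ys := by
        simp only [PySem.Set.mem_update, PySem.Set.mem_ofList] at *
        exact Or.inr hx
      exact (PySem.Set.add_of_mem hx').symm
    · rw [PySem.Set.add_of_not_mem hx, PySem.Set.update_append, ih]

-- union of the two 4-element set literals = the deduplication of the concatenated 8-element list
lemma pv_union_ofList {α : Type} [BEq α] [LawfulBEq α] (l1 l2 : List α) :
    PySem.Set.union (PySem.Set.ofList l1) (PySem.Set.ofList l2) = PySem.Set.ofList (l1 ++ l2) := by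
  rw [PySem.Set.ofList_append]
  exact pv_update_ofList _ _

-- ===== VERDICT (by name: the statement is the Claim_ definition above) =====
theorem augment_shape_spec : Claim_equal_augment_shape := by
  intro base_shape _ hpre
  obtain ⟨hne, hw0, _⟩ := hpre
  show augment_shape base_shape = augment_shape_alt base_shape
  simp only [augment_shape, augment_shape_alt]
  set b := base_shape.map String.toList with hb
  set h := b.length with hh
  set w := (b.headD []).length with hw
  obtain ⟨x, xs, rfl⟩ := List.exists_cons_of_ne_nil hne
  have hh0 : 0 < h := by simp [hh, hb]
  have hw0' : 0 < w := by simpa [hw, hb] using hw0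
  have hm : pvFlip b = b.map List.reverse := rfl
  have hml : (b.map List.reverse).length = h := by simp [hh]
  have hmh : ((b.map List.reverse).headD []).length = w := by simp [hb, hw]
  obtain ⟨a1, a2, a3⟩ := pv_chain b h w rfl rfl hh0 hw0'
  obtain ⟨f1, f2, f3⟩ := pv_chain (b.map List.reverse) h w hml hmh hh0 hw0'
  rw [pv_union_ofList, hm, a3, a2, a1, f3, f2, f1]
  rfl
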